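-- pv_equiv track=rewrite | github.com/minkue777/Algorithm | others/dduck.py | dduckLength
-- ===== SOURCE A (Python) =====
-- def dduckLength(sortDuck, H):
--     ans = 0
--     for d in sortDuck:
--         if d > H:
--             ans += d - H
--         else:
--             break
--     return ans
-- ===== SOURCE B (Python) =====
-- def dduckLength(sortDuck, H):
--     idx = next((i for i, d in enumerate(sortDuck) if d <= H), len(sortDuck))
--     return sum(sortDuck[:idx]) - H * idx
-- ===== Notes on version B (the rewrite author's own statement) =====
-- stated objective: alternative
-- what changed: B first locates the boundary index of the leading run of ducks taller than H, then returns the prefix sum minus H times that count, instead of accumulating per-element differences in a break-out loop.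
import Mathlib
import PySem

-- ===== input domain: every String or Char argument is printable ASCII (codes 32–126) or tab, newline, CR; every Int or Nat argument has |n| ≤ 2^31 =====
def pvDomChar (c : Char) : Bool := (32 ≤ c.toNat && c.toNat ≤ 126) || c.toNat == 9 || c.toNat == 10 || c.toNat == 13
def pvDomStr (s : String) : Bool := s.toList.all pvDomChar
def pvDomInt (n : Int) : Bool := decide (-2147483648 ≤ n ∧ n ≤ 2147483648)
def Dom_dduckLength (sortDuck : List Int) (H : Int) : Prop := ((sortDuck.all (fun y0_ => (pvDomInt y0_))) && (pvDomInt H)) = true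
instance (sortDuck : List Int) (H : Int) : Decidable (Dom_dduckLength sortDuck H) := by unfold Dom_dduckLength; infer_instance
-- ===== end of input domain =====

-- B computes the boundary index of the leading run of ducks > H, then prefix-sum minus H*count (alternative decomposition, same cost).

-- ===== PORT A =====
-- for d in sortDuck: if d > H: ans += d - H else: break
def dduckLengthGo (H : Int) (ans : Int) : List Int → Int
  | [] => ans
  | d :: rest => if d > H then dduckLengthGo H (ans + (d - H)) rest else ans

def dduckLength (sortDuck : List Int) (H : Int) : Int := dduckLengthGo H 0 sortDuck

-- ===== PORT B =====
-- idx = next((i for i, d in enumerate(sortDuck) if d <= H), len(sortDuck))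
def firstLeIdx (H : Int) : List Int → Nat
  | [] => 0
  | d :: rest => if d ≤ H then 0 else 1 + firstLeIdx H rest

-- sum(sortDuck[:idx]) - H * idx
def dduckLength_alt (sortDuck : List Int) (H : Int) : Int :=
  (sortDuck.take (firstLeIdx H sortDuck)).sum - H * (firstLeIdx H sortDuck)

-- ===== PRECONDITION & SPEC =====
def Spec_dduckLength (sortDuck : List Int) (H : Int) (out : Int) : Prop := out = dduckLength_alt sortDuck H
instance (sortDuck : List Int) (H : Int) (out : Int) : Decidable (Spec_dduckLength sortDuck H out) := by unfold Spec_dduckLength; infer_instance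

-- ===== CLAIM (what is proved, stated in full; the proofs are below) =====
def Claim_equal_dduckLength : Prop := ∀ (sortDuck : List Int) (H : Int), Dom_dduckLength sortDuck H → Spec_dduckLength sortDuck H (dduckLength sortDuck H)

-- ===== LEMMAS AND PROOFS =====
theorem dduckLengthGo_eq (H : Int) (l : List Int) : ∀ ans : Int,
    dduckLengthGo H ans l = ans + ((l.take (firstLeIdx H l)).sum - H * (firstLeIdx H l)) := by
  induction l with
  | nil => intro ans; simp [dduckLengthGo, firstLeIdx]
  | cons d rest ih =>
    intro ans
    by_cases h : d ≤ H
    · simp [dduckLengthGo, firstLeIdx, h, not_lt.mpr h]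
    · have hgt : d > H := lt_of_not_ge h
      simp only [dduckLengthGo, firstLeIdx, if_pos hgt, if_neg h, List.take_succ_cons,
        Nat.add_comm 1, List.sum_cons, ih]
      push_cast
      ring

-- ===== VERDICT (by name: the statement is the Claim_ definition above) =====
theorem dduckLength_spec : Claim_equal_dduckLength := by
  intro sortDuck H _
  unfold Spec_dduckLength dduckLength dduckLength_alt
  simpa using dduckLengthGo_eq H sortDuck 0
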